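-- pv_equiv track=rewrite | github.com/opensw-project/Calculator | 새로운 폴더/recognize Operands.py | recognize_Operands
-- ===== SOURCE A (Python) =====
-- def recognize_Operands(infix):
--     numbers = list('0123456789.')                       # 실수 계산기 이므로, 모든 피연산자는 0~9인 정수와 .으로 이루어진다
--     recognized = []                                      # 수식의 숫자들을 피연산자로 인식하여 다시 담아 줄 리스트
--
--     i = 0
--     while i < len(infix):
--         j = 1
--         if infix[i] in numbers:                         # 연산자가 아닐 경우, 즉 숫자 또는 .일 경우
--             while i + j < len(infix):                   # 해당 요소의 다음 요소도 숫자 또는 .인지를 판별하고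
--                 if infix[i + j] in numbers:
--                     j += 1
--                 else:
--                     break
--             recognized.append(''.join(infix[i:i + j]))   # 이들을 하나로, 즉 하나의 숫자로 인식 할 수 있도록 묶어준다
--             i += j
--         else:                                           # 연산자일 경우엔 리스트에 바로 추가해준다
--             recognized.append(infix[i])
--             i += 1
--     return recognized
-- ===== SOURCE B (Python) =====
-- def recognize_Operands(infix):
--     digits = frozenset('0123456789.')
--     recognized = []
--     prev_num = False
--     for tok in infix:
--         if tok in digits:
--             if prev_num:
--                 recognized[-1] += tok       # extend the number being built
--             else:
--                 recognized.append(tok)      # start a new number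
--             prev_num = True
--         else:
--             recognized.append(tok)          # operators pass through one by one
--             prev_num = False
--     return recognized
-- ===== Notes on version B (the rewrite author's own statement) =====
-- stated objective: simpler
-- what changed: Single forward fold with a prev-was-number flag that concatenates a digit/dot token onto the last emitted token, replacing A's index-advancing outer loop with an inner lookahead loop that rescans and slices each run before joining it; no indexing, no lookahead, no slicing.
import Mathlib
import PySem

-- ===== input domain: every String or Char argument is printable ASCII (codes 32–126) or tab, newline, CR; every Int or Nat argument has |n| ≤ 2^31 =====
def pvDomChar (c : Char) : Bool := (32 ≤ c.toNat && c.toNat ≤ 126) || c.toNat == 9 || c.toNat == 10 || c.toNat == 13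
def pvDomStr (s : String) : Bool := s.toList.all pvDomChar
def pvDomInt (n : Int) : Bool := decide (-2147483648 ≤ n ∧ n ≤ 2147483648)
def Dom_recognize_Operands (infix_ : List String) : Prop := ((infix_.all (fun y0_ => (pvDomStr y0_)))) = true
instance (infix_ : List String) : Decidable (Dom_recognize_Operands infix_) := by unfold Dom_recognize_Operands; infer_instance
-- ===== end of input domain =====

-- B replaces A's index-advancing outer loop + inner lookahead run scan with a single forward
-- fold keeping a prev-was-number flag and concatenating digit tokens onto the last emitted
-- token (objective: simpler).

-- ===== PORT A =====
-- numbers = list('0123456789.')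
def pvNumbersA : List String := ["0","1","2","3","4","5","6","7","8","9","."]

-- the inner 'while i + j < len(infix): if infix[i+j] in numbers: j += 1 else: break'
def pvInnerJ (infix_ : List String) (i j : Nat) : Nat :=
  if i + j < infix_.length then
    if pvNumbersA.contains (infix_.getD (i + j) "") then pvInnerJ infix_ i (j + 1) else j
  else j
termination_by infix_.length - (i + j)

theorem pvInnerJ_ge (infix_ : List String) (i j : Nat) : j ≤ pvInnerJ infix_ i j := by
  unfold pvInnerJ
  split
  · split
    · exact le_trans (Nat.le_succ j) (pvInnerJ_ge infix_ i (j + 1))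
    · exact le_refl j
  · exact le_refl j
termination_by infix_.length - (i + j)

-- the outer 'while i < len(infix)' loop; infix[i:i+j] (0 ≤ i) is (drop i).take j,
-- ''.join is String.join
def pvALoop (infix_ : List String) (recognized : List String) (i : Nat) : List String :=
  if _h : i < infix_.length then
    if pvNumbersA.contains (infix_.getD i "") then
      let j := pvInnerJ infix_ i 1
      pvALoop infix_ (recognized ++ [String.join ((infix_.drop i).take j)]) (i + j)
    else
      pvALoop infix_ (recognized ++ [infix_.getD i ""]) (i + 1)
  else recognized
termination_by infix_.length - i
decreasing_by
  · have := pvInnerJ_ge infix_ i 1; omega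
  · omega

def recognize_Operands (infix_ : List String) : List String :=
  pvALoop infix_ [] 0

-- ===== PORT B =====
-- digits = frozenset('0123456789.')
def pvDigitsB : PySem.Set String :=
  PySem.Set.ofList ["0","1","2","3","4","5","6","7","8","9","."]

-- one iteration of Source B's for-loop; state is (recognized, prev_num).
-- 'recognized[-1] += tok' is only reached with prev_num = true, where recognized is
-- nonempty, so replacing the last element via dropLast/getLastD is exact there.
def pvStepB (st : List String × Bool) (tok : String) : List String × Bool :=
  if pvDigitsB.contains tok then
    if st.2 then (st.1.dropLast ++ [st.1.getLastD "" ++ tok], true)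
    else (st.1 ++ [tok], true)
  else (st.1 ++ [tok], false)

def recognize_Operands_alt (infix_ : List String) : List String :=
  (infix_.foldl pvStepB ([], false)).1

-- ===== PRECONDITION & SPEC =====
def Spec_recognize_Operands (infix_ : List String) (out : List String) : Prop := out = recognize_Operands_alt infix_
instance (infix_ : List String) (out : List String) : Decidable (Spec_recognize_Operands infix_ out) := by unfold Spec_recognize_Operands; infer_instance

-- ===== CLAIM (what is proved, stated in full; the proofs are below) =====
def Claim_equal_recognize_Operands : Prop := ∀ (infix_ : List String), Dom_recognize_Operands infix_ → Spec_recognize_Operands infix_ (recognize_Operands infix_)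

-- ===== LEMMAS AND PROOFS =====

-- reference characterisation: the list of maximal number runs (joined) and single operators
def pvRuns (infix_ : List String) : List String :=
  match infix_ with
  | [] => []
  | x :: xs =>
    if pvNumbersA.contains x then
      String.join (x :: xs.takeWhile (fun s => pvNumbersA.contains s))
        :: pvRuns (xs.dropWhile (fun s => pvNumbersA.contains s))
    else
      x :: pvRuns xs
termination_by infix_.length
decreasing_by
  · exact Nat.lt_succ_of_le (List.length_dropWhile_le _ _)
  · exact Nat.lt_succ_self _

-- the two membership containers agree
@[simp] theorem pvContains_eq (s : String) :
    pvDigitsB.contains s = pvNumbersA.contains s := by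
  have : pvDigitsB = (pvNumbersA : PySem.Set String) := by decide
  rw [this]; rfl

theorem pv_foldl_append (t : List String) (a b : String) :
    t.foldl (fun r s => r ++ s) (a ++ b) = a ++ t.foldl (fun r s => r ++ s) b := by
  induction t generalizing b with
  | nil => rfl
  | cons c t ih =>
    simp only [List.foldl_cons, String.append_assoc]
    exact ih (b ++ c)

theorem pv_join_cons (x : String) (t : List String) :
    String.join (x :: t) = x ++ String.join t := by
  show List.foldl (fun r s => r ++ s) ("" ++ x) t = x ++ List.foldl (fun r s => r ++ s) "" t
  rw [show ("" ++ x : String) = x from by simp, show (x : String) = x ++ "" from by simp]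
  rw [pv_foldl_append t x ""]
  simp

-- === A equals pvRuns ===

-- pvInnerJ counts the maximal run of number tokens starting at position i + j
theorem pvInnerJ_eq (infix_ : List String) (i j : Nat) :
    pvInnerJ infix_ i j
      = j + ((infix_.drop (i + j)).takeWhile (fun s => pvNumbersA.contains s)).length := by
  unfold pvInnerJ
  by_cases h : i + j < infix_.length
  · have hd : infix_.drop (i + j) = infix_[i + j] :: infix_.drop (i + j + 1) :=
      List.drop_eq_getElem_cons h
    have hg : infix_.getD (i + j) "" = infix_[i + j] := List.getD_eq_getElem _ _ h
    by_cases hn : pvNumbersA.contains infix_[i + j]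
    · simp only [h, if_true, hg, hn]
      rw [pvInnerJ_eq infix_ i (j + 1),
        show i + (j + 1) = i + j + 1 from by omega]
      rw [hd]
      simp only [List.takeWhile_cons, hn, if_true, List.length_cons]
      omega
    · simp only [h, if_true, hg, hn, Bool.false_eq_true, if_false, hd,
        List.takeWhile_cons, List.length_nil]
      omega
  · simp only [h, if_false]
    have hnil : infix_.drop (i + j) = [] := List.drop_eq_nil_of_le (by omega)
    simp [hnil]
termination_by infix_.length - (i + j)

theorem pvALoop_eq (infix_ : List String) (i : Nat) (recognized : List String) :
    pvALoop infix_ recognized i = recognized ++ pvRuns (infix_.drop i) := by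
  unfold pvALoop
  by_cases h : i < infix_.length
  · have hd : infix_.drop i = infix_[i] :: infix_.drop (i + 1) :=
      List.drop_eq_getElem_cons h
    have hg : infix_.getD i "" = infix_[i] := List.getD_eq_getElem _ _ h
    by_cases hn : pvNumbersA.contains infix_[i]
    · simp only [h, dif_pos, hg, hn, if_true]
      rw [pvALoop_eq infix_ (i + pvInnerJ infix_ i 1)]
      have hj := pvInnerJ_eq infix_ i 1
      set t := (infix_.drop (i + 1)).takeWhile (fun s => pvNumbersA.contains s) with ht
      set d := (infix_.drop (i + 1)).dropWhile (fun s => pvNumbersA.contains s) with hdw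
      have hrest : infix_.drop (i + 1) = t ++ d := List.takeWhile_append_dropWhile.symm
      have hslice : (infix_.drop i).take (pvInnerJ infix_ i 1) = infix_[i] :: t := by
        rw [hd, hj, Nat.add_comm 1 t.length, List.take_succ_cons, hrest, List.take_left]
      have hdrop : infix_.drop (i + pvInnerJ infix_ i 1) = d := by
        have hsplit : infix_.drop (i + pvInnerJ infix_ i 1)
            = (infix_.drop (i + 1)).drop t.length := by
          rw [List.drop_drop]; congr 1; omega
        rw [hsplit, hrest, show List.drop t.length (t ++ d) = d from List.drop_left]
      rw [hslice, hdrop, hd]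
      conv_rhs => rw [pvRuns]
      rw [if_pos hn, ← ht, ← hdw]
      simp
    · simp only [h, dif_pos, hg, hn, Bool.false_eq_true, if_false]
      rw [pvALoop_eq infix_ (i + 1)]
      rw [hd]
      conv_rhs => rw [pvRuns]
      rw [if_neg hn]
      simp
  · simp only [h, dif_neg, not_false_iff]
    have hnil : infix_.drop i = [] := List.drop_eq_nil_of_le (by omega)
    rw [hnil]
    simp [pvRuns]
termination_by infix_.length - i
decreasing_by
  · have := pvInnerJ_ge infix_ i 1; omega
  · omega

-- === B equals pvRuns ===

-- folding a run of number tokens with prev_num = true concatenates them onto the last token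
theorem pvFoldB_run (t : List String) (ht : ∀ s ∈ t, pvNumbersA.contains s = true)
    (out : List String) (s : String) :
    t.foldl pvStepB (out ++ [s], true) = (out ++ [s ++ String.join t], true) := by
  induction t generalizing s with
  | nil => simp [String.join]
  | cons c t ih =>
    have hc : pvNumbersA.contains c = true := ht c (by simp)
    simp only [List.foldl_cons, pvStepB, pvContains_eq, hc, if_true]
    simp only [List.dropLast_concat, List.getLastD_concat]
    rw [ih (fun s hs => ht s (by simp [hs])) (s ++ c), pv_join_cons, String.append_assoc]

theorem pvFoldB_eq (xs out : List String) :
    (xs.foldl pvStepB (out, false)).1 = out ++ pvRuns xs := by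
  match xs with
  | [] => simp [pvRuns]
  | x :: rest =>
    by_cases hx : pvNumbersA.contains x
    · have hstep : pvStepB (out, false) x = (out ++ [x], true) := by
        simp only [pvStepB, pvContains_eq]
        rw [hx]
        simp
      have hrest : rest = rest.takeWhile (fun s => pvNumbersA.contains s)
          ++ rest.dropWhile (fun s => pvNumbersA.contains s) :=
        List.takeWhile_append_dropWhile.symm
      have hrun := pvFoldB_run (rest.takeWhile (fun s => pvNumbersA.contains s))
        (fun s hs => by simpa using List.mem_takeWhile_imp hs) out x
      rw [List.foldl_cons, hstep]
      conv_lhs => rw [hrest, List.foldl_append]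
      rw [hrun]
      conv_rhs => rw [pvRuns]
      rw [if_pos hx]
      cases hdc : rest.dropWhile (fun s => pvNumbersA.contains s) with
      | nil => simp [pvRuns, pv_join_cons]
      | cons y d' =>
        have h0 := List.head?_dropWhile_not (fun s => pvNumbersA.contains s) rest
        rw [hdc] at h0
        have hy : pvNumbersA.contains y = false := by simpa using h0
        have hlt : d'.length < (x :: rest).length := by
          have h2 := List.length_dropWhile_le (fun s => pvNumbersA.contains s) rest
          rw [hdc] at h2
          simp at h2 ⊢
          omega
        have hstep2 : pvStepB (out ++ [x ++ String.join
              (rest.takeWhile (fun s => pvNumbersA.contains s))], true) y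
            = (out ++ [x ++ String.join
              (rest.takeWhile (fun s => pvNumbersA.contains s))] ++ [y], false) := by
          simp only [pvStepB, pvContains_eq]
          rw [hy]
          simp
        rw [List.foldl_cons, hstep2, pvFoldB_eq d']
        conv_rhs => rw [pvRuns]
        rw [if_neg (by intro h; rw [hy] at h; cases h)]
        simp [pv_join_cons]
    · have hstep : pvStepB (out, false) x = (out ++ [x], false) := by
        simp only [pvStepB, pvContains_eq]
        rw [Bool.eq_false_iff.mpr hx]
        simp
      rw [List.foldl_cons, hstep, pvFoldB_eq rest (out ++ [x])]
      conv_rhs => rw [pvRuns]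
      rw [if_neg hx]
      simp
termination_by xs.length
decreasing_by
  · simpa using hlt
  · simp

-- ===== VERDICT (by name: the statement is the Claim_ definition above) =====
theorem recognize_Operands_spec : Claim_equal_recognize_Operands := by
  intro infix_ _
  unfold Spec_recognize_Operands recognize_Operands recognize_Operands_alt
  rw [pvALoop_eq, pvFoldB_eq]
  simp
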